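-- pv_equiv track=rewrite | github.com/HasanBradfordUni/myPublicFiles | Portfolio/Python Apps/Football chess/Football_chess V12.py | LW_moves
-- ===== SOURCE A (Python) =====
-- def LW_moves(moveFromX, moveFromY, moveToX, moveToY, size, player1Turn, player2Turn):
--     possibleMoves = []
--
--     moveDif = ((moveToX - moveFromX),(moveToY - moveFromY))
--
--     if player2Turn:
--         possibleMoves.append((1,1))
--         possibleMoves.append((1,-1))
--     elif player1Turn:
--         possibleMoves.append((-1,1))
--         possibleMoves.append((-1,-1))
--
--     for x in range(size):
--         for y in range(size):
--             if x == y: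
--                 if player2Turn:
--                     possibleMoves.append((-x,-y))
--                     possibleMoves.append((-x,y))
--                 elif player1Turn:
--                     possibleMoves.append((x,-y))
--                     possibleMoves.append((x,y))
--
--     if moveDif in possibleMoves:
--         return True
--     else:
--         return False
-- ===== SOURCE B (Python) =====
-- def _diag_ok(dx, dy, fwd, size):
--     # one forward diagonal step, or any backward (for fwd's owner) diagonal of length < size (incl. 0)
--     if dx == fwd and (dy == 1 or dy == -1):
--         return True
--     return (dy == dx or dy == -dx) and 0 <= -fwd * dx < size
--
--
-- def LW_moves(moveFromX, moveFromY, moveToX, moveToY, size, player1Turn, player2Turn):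
--     dx = moveToX - moveFromX
--     dy = moveToY - moveFromY
--     if player2Turn:
--         return _diag_ok(dx, dy, 1, size)
--     if player1Turn:
--         return _diag_ok(dx, dy, -1, size)
--     return False
-- ===== Notes on version B (the rewrite author's own statement) =====
-- stated objective: faster
-- what changed: B replaces A's O(size^2) enumeration of all possible diagonal offsets followed by a list-membership test with a direct O(1) arithmetic test on the move delta (one forward diagonal step, or a backward diagonal of length below size).
import Mathlib
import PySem

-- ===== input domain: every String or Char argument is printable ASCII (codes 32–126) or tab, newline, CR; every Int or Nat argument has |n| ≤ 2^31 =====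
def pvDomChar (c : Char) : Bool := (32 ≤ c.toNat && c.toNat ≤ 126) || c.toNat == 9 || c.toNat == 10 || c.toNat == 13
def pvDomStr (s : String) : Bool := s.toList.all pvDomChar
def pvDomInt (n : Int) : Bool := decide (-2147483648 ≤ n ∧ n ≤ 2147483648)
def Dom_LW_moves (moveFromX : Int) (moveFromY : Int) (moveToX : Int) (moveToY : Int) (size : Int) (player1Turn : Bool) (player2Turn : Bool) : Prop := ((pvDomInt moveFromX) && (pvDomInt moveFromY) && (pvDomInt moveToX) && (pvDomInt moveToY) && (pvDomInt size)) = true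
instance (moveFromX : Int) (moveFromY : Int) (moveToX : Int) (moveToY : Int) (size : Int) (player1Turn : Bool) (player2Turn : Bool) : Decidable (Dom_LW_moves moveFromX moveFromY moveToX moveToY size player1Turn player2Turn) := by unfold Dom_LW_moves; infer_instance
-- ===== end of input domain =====

-- B replaces A's O(size^2) enumeration of diagonal offsets with a direct arithmetic test on the move delta (objective: faster).
-- ===== PORT A =====
def LW_moves (moveFromX : Int) (moveFromY : Int) (moveToX : Int) (moveToY : Int) (size : Int) (player1Turn : Bool) (player2Turn : Bool) : Bool :=
  let moveDif : Int × Int := (moveToX - moveFromX, moveToY - moveFromY)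
  let possibleMoves : List (Int × Int) :=
    if player2Turn then [((1 : Int), (1 : Int)), (1, -1)]
    else if player1Turn then [((-1 : Int), (1 : Int)), (-1, -1)]
    else []
  let possibleMoves :=
    (PySem.List.pyRange 0 size 1).foldl (fun acc x =>
      (PySem.List.pyRange 0 size 1).foldl (fun acc y =>
        if x == y then
          if player2Turn then acc ++ [(-x, -y), (-x, y)]
          else if player1Turn then acc ++ [(x, -y), (x, y)]
          else acc
        else acc) acc) possibleMoves
  if possibleMoves.contains moveDif then true else false

-- ===== PORT B =====
-- B: O(1) arithmetic test on the move delta instead of enumerating all diagonal offsets.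
def diagOk (dx : Int) (dy : Int) (fwd : Int) (size : Int) : Bool :=
  if dx == fwd && (dy == 1 || dy == -1) then true
  else (dy == dx || dy == -dx) && (decide (0 ≤ -fwd * dx) && decide (-fwd * dx < size))

def LW_moves_alt (moveFromX : Int) (moveFromY : Int) (moveToX : Int) (moveToY : Int) (size : Int) (player1Turn : Bool) (player2Turn : Bool) : Bool :=
  let dx := moveToX - moveFromX
  let dy := moveToY - moveFromY
  if player2Turn then diagOk dx dy 1 size
  else if player1Turn then diagOk dx dy (-1) size
  else false

-- ===== PRECONDITION & SPEC =====
def Spec_LW_moves (moveFromX : Int) (moveFromY : Int) (moveToX : Int) (moveToY : Int) (size : Int) (player1Turn : Bool) (player2Turn : Bool) (out : Bool) : Prop := out = LW_moves_alt moveFromX moveFromY moveToX moveToY size player1Turn player2Turn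
instance (moveFromX : Int) (moveFromY : Int) (moveToX : Int) (moveToY : Int) (size : Int) (player1Turn : Bool) (player2Turn : Bool) (out : Bool) : Decidable (Spec_LW_moves moveFromX moveFromY moveToX moveToY size player1Turn player2Turn out) := by unfold Spec_LW_moves; infer_instance

-- ===== CLAIM (what is proved, stated in full; the proofs are below) =====
def Claim_equal_LW_moves : Prop := ∀ (moveFromX : Int) (moveFromY : Int) (moveToX : Int) (moveToY : Int) (size : Int) (player1Turn : Bool) (player2Turn : Bool), Dom_LW_moves moveFromX moveFromY moveToX moveToY size player1Turn player2Turn → Spec_LW_moves moveFromX moveFromY moveToX moveToY size player1Turn player2Turn (LW_moves moveFromX moveFromY moveToX moveToY size player1Turn player2Turn)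

-- ===== LEMMAS AND PROOFS =====

theorem ite_tf (c : Bool) : (if c = true then true else false) = c := by cases c <;> simp

theorem foldl_keep {α β : Type} (l : List β) (acc : α) :
    l.foldl (fun a _ => a) acc = acc := by
  induction l generalizing acc with
  | nil => rfl
  | cons b t ih => exact ih acc

-- membership in A's nested diagonal-offset fold, for a fixed per-cell generator g
theorem mem_buildFold (size : Int) (g : Int → Int → List (Int × Int))
    (base : List (Int × Int)) (d : Int × Int) :
    (d ∈ (PySem.List.pyRange 0 size 1).foldl (fun acc x =>
      (PySem.List.pyRange 0 size 1).foldl (fun acc y =>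
        if x == y then acc ++ g x y else acc) acc) base) ↔
    d ∈ base ∨ ∃ x : Int, 0 ≤ x ∧ x < size ∧ d ∈ g x x := by
  have hinner : ∀ (x : Int) (acc : List (Int × Int)),
      (PySem.List.pyRange 0 size 1).foldl (fun acc y =>
        if x == y then acc ++ g x y else acc) acc
      = acc ++ (PySem.List.pyRange 0 size 1).flatMap
          (fun y => if x == y then g x y else []) := by
    intro x acc
    have hfe : (fun (acc : List (Int × Int)) y => if x == y then acc ++ g x y else acc)
        = fun acc y => acc ++ (if x == y then g x y else []) := by
      funext acc y; by_cases h : x == y <;> simp [h]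
    rw [hfe, PySem.List.foldl_append_eq_flatMap]
  have houter : (PySem.List.pyRange 0 size 1).foldl (fun acc x =>
      (PySem.List.pyRange 0 size 1).foldl (fun acc y =>
        if x == y then acc ++ g x y else acc) acc) base
      = base ++ (PySem.List.pyRange 0 size 1).flatMap (fun x =>
          (PySem.List.pyRange 0 size 1).flatMap
            (fun y => if x == y then g x y else [])) := by
    have hfe : (fun (acc : List (Int × Int)) x =>
        (PySem.List.pyRange 0 size 1).foldl (fun acc y =>
          if x == y then acc ++ g x y else acc) acc)
        = fun acc x => acc ++ (PySem.List.pyRange 0 size 1).flatMap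
            (fun y => if x == y then g x y else []) := by
      funext acc x; exact hinner x acc
    rw [hfe, PySem.List.foldl_append_eq_flatMap]
  rw [houter]
  simp only [List.mem_append, List.mem_flatMap, PySem.List.mem_pyRange_one]
  constructor
  · rintro (hb | ⟨x, hx, y, hy, hd⟩)
    · exact Or.inl hb
    · right
      by_cases h : x == y
      · have hxy : x = y := by simpa using h
        subst hxy
        simp only [BEq.rfl, if_true] at hd
        exact ⟨x, hx.1, hx.2, hd⟩
      · simp [h] at hd
  · rintro (hb | ⟨x, h0, hs, hd⟩)
    · exact Or.inl hb
    · exact Or.inr ⟨x, ⟨h0, hs⟩, x, ⟨h0, hs⟩, by simp [hd]⟩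

-- the same fold with A's player-flag branches in the body
theorem mem_buildFoldFlag (size : Int) (p1 p2 : Bool)
    (base : List (Int × Int)) (d : Int × Int) :
    (d ∈ (PySem.List.pyRange 0 size 1).foldl (fun acc x =>
      (PySem.List.pyRange 0 size 1).foldl (fun acc y =>
        if x == y then
          if p2 then acc ++ [(-x, -y), (-x, y)]
          else if p1 then acc ++ [(x, -y), (x, y)]
          else acc
        else acc) acc) base) ↔
    d ∈ base ∨ ∃ x : Int, 0 ≤ x ∧ x < size ∧
      d ∈ (if p2 then [(-x, -x), (-x, x)]
           else if p1 then [(x, -x), (x, x)]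
           else ([] : List (Int × Int))) := by
  cases p2 with
  | true => simpa using mem_buildFold size (fun x y => [(-x, -y), (-x, y)]) base d
  | false =>
    cases p1 with
    | true => simpa using mem_buildFold size (fun x y => [(x, -y), (x, y)]) base d
    | false =>
      have hfe : (fun (acc : List (Int × Int)) (x : Int) =>
          (PySem.List.pyRange 0 size 1).foldl (fun acc y =>
            if x == y then
              if false then acc ++ [(-x, -y), (-x, y)]
              else if false then acc ++ [(x, -y), (x, y)]
              else acc
            else acc) acc)
          = fun acc _ => acc := by
        funext acc x
        have : (fun (acc : List (Int × Int)) (y : Int) =>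
            if x == y then
              if false then acc ++ [(-x, -y), (-x, y)]
              else if false then acc ++ [(x, -y), (x, y)]
              else acc
            else acc) = fun acc _ => acc := by
          funext acc y; by_cases h : x == y <;> simp [h]
        rw [this, foldl_keep]
      rw [hfe, foldl_keep]
      simp

theorem diagOk_eq_true_iff (dx dy fwd size : Int) :
    diagOk dx dy fwd size = true ↔
    (dx = fwd ∧ (dy = 1 ∨ dy = -1)) ∨
      ((dy = dx ∨ dy = -dx) ∧ 0 ≤ -fwd * dx ∧ -fwd * dx < size) := by
  unfold diagOk
  split_ifs with h
  · simp only [Bool.and_eq_true, Bool.or_eq_true, beq_iff_eq] at h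
    simp [h]
  · simp only [Bool.and_eq_true, Bool.or_eq_true, beq_iff_eq, decide_eq_true_eq]
    simp only [Bool.and_eq_true, Bool.or_eq_true, beq_iff_eq] at h
    tauto

-- ===== VERDICT (by name: the statement is the Claim_ definition above) =====
theorem LW_moves_spec : Claim_equal_LW_moves := by
  intro moveFromX moveFromY moveToX moveToY size player1Turn player2Turn _
  unfold Spec_LW_moves LW_moves LW_moves_alt
  simp only [ite_tf]
  set dx := moveToX - moveFromX with hdx
  set dy := moveToY - moveFromY with hdy
  rw [Bool.eq_iff_iff, List.contains_iff_mem, mem_buildFoldFlag]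
  by_cases h2 : player2Turn = true
  · simp only [h2, if_true, List.mem_cons, List.not_mem_nil, or_false, Prod.mk.injEq,
      diagOk_eq_true_iff]
    constructor
    · rintro ((⟨ha, hb⟩ | ⟨ha, hb⟩) | ⟨x, h0, hs, (⟨ha, hb⟩ | ⟨ha, hb⟩)⟩)
      · exact Or.inl ⟨ha, Or.inl hb⟩
      · exact Or.inl ⟨ha, Or.inr hb⟩
      · exact Or.inr ⟨Or.inl (by omega), by omega, by omega⟩
      · exact Or.inr ⟨Or.inr (by omega), by omega, by omega⟩
    · rintro (⟨ha, (hb | hb)⟩ | ⟨(ha | ha), hb, hc⟩)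
      · exact Or.inl (Or.inl ⟨ha, hb⟩)
      · exact Or.inl (Or.inr ⟨ha, hb⟩)
      · exact Or.inr ⟨-dx, by omega, by omega, Or.inl ⟨by omega, by omega⟩⟩
      · exact Or.inr ⟨-dx, by omega, by omega, Or.inr ⟨by omega, by omega⟩⟩
  · by_cases h1 : player1Turn = true
    · simp only [h2, h1, if_true, if_false, Bool.false_eq_true, List.mem_cons,
        List.not_mem_nil, or_false, Prod.mk.injEq, diagOk_eq_true_iff]
      constructor
      · rintro ((⟨ha, hb⟩ | ⟨ha, hb⟩) | ⟨x, h0, hs, (⟨ha, hb⟩ | ⟨ha, hb⟩)⟩)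
        · exact Or.inl ⟨ha, Or.inl hb⟩
        · exact Or.inl ⟨ha, Or.inr hb⟩
        · exact Or.inr ⟨Or.inr (by omega), by omega, by omega⟩
        · exact Or.inr ⟨Or.inl (by omega), by omega, by omega⟩
      · rintro (⟨ha, (hb | hb)⟩ | ⟨(ha | ha), hb, hc⟩)
        · exact Or.inl (Or.inl ⟨ha, hb⟩)
        · exact Or.inl (Or.inr ⟨ha, hb⟩)
        · exact Or.inr ⟨dx, by omega, by omega, Or.inr ⟨by omega, by omega⟩⟩
        · exact Or.inr ⟨dx, by omega, by omega, Or.inl ⟨by omega, by omega⟩⟩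
    · simp [h1, h2]
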